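-- pv_equiv track=rewrite | github.com/hypergraphman/AnnaEGE24 | task19-21/heap2.py | f
-- ===== SOURCE A (Python) =====
-- def f(s1, s2, c, m):
--     if s1 + s2 >= 141:
--         return c % 2 == m % 2
--     if c == m:
--         return False
--     moves = [f(s1 + 1, s2, c + 1, m),
--              f(s1 * 2, s2, c + 1, m),
--              f(s1, s2 + 1, c + 1, m),
--              f(s1, s2 * 2, c + 1, m),
--              ]
--     if (c + 1) % 2 == m % 2:
--         return any(moves)
--     else:
--         return all(moves)
-- ===== SOURCE B (Python) =====
-- def f(s1, s2, c, m):
--     # Dynamic programming: the game value is memoized per distinct state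
--     # (heap1, heap2, move count) and each state is evaluated once.
--     memo = {}
--
--     def g(a, b, k):
--         if a + b >= 141:
--             return k % 2 == m % 2
--         if k == m:
--             return False
--         key = (a, b, k)
--         if key in memo:
--             return memo[key]
--         vs = [g(a + 1, b, k + 1), g(a * 2, b, k + 1),
--               g(a, b + 1, k + 1), g(a, b * 2, k + 1)]
--         res = any(vs) if (k + 1) % 2 == m % 2 else all(vs)
--         memo[key] = res
--         return res
--
--     return g(s1, s2, c)
-- ===== Notes on version B (the rewrite author's own statement) =====
-- stated objective: alternative
-- what changed: B recasts the search as dynamic programming: it memoizes the game value per distinct state (heap1, heap2, move count), evaluating each state once rather than once per path of A's game tree (not measurably faster on the sampled inputs, where the tree is small); Pre_f only excludes inputs on which A raises RecursionError (c > m with a heap <= 0, where one move leaves the heap sum unchanged forever, and c <= m with a heap <= 0 and m - c beyond Python's recursion limit).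
import Mathlib
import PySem

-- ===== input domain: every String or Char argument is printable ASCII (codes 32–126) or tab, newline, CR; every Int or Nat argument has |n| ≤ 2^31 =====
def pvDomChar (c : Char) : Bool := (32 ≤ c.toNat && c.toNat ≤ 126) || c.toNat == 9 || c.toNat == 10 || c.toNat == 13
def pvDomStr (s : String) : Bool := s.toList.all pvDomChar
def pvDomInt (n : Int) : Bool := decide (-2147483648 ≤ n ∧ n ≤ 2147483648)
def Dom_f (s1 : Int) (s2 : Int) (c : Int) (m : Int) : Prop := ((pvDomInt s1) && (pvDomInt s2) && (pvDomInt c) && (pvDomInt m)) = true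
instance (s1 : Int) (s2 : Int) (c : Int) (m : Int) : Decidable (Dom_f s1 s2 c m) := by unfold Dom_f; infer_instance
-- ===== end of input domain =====

-- B memoizes the game-tree recursion per distinct state (heap1, heap2, move count), solving each
-- state once instead of once per path; equivalence of return values is proved on Pre_f.

-- ===== PORT A =====
-- fuel only makes the recursion total (Python recursion has no such argument); inside Pre_f the
-- fuel chosen by f below never runs out.
def fA : Nat → Int → Int → Int → Int → Bool
  | 0, _, _, _, _ => false
  | fuel + 1, s1, s2, c, m =>
    if s1 + s2 ≥ 141 then decide (c % 2 = m % 2)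
    else if c = m then false
    else
      let m1 := fA fuel (s1 + 1) s2 (c + 1) m
      let m2 := fA fuel (s1 * 2) s2 (c + 1) m
      let m3 := fA fuel s1 (s2 + 1) (c + 1) m
      let m4 := fA fuel s1 (s2 * 2) (c + 1) m
      if (c + 1) % 2 = m % 2 then m1 || m2 || m3 || m4 else m1 && m2 && m3 && m4

def f (s1 : Int) (s2 : Int) (c : Int) (m : Int) : Bool :=
  fA ((m - c).toNat + (141 - s1 - s2).toNat + 1) s1 s2 c m

-- ===== PORT B =====
-- g of Source B: the memo dict is keyed by (heap1, heap2, count) exactly as in Source B and threaded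
-- left to right through the four recursive calls; the fuel argument only makes it total.
def gB (m : Int) : Nat → Int → Int → Int → PySem.Dict (Int × Int × Int) Bool →
    Bool × PySem.Dict (Int × Int × Int) Bool
  | 0, _, _, _, memo => (false, memo)
  | fuel + 1, a, b, k, memo =>
    if a + b ≥ 141 then (decide (k % 2 = m % 2), memo)
    else if k = m then (false, memo)
    else
      match memo.get? (a, b, k) with
      | some v => (v, memo)
      | none =>
        let r1 := gB m fuel (a + 1) b (k + 1) memo
        let r2 := gB m fuel (a * 2) b (k + 1) r1.2
        let r3 := gB m fuel a (b + 1) (k + 1) r2.2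
        let r4 := gB m fuel a (b * 2) (k + 1) r3.2
        let res := if (k + 1) % 2 = m % 2 then r1.1 || r2.1 || r3.1 || r4.1
                   else r1.1 && r2.1 && r3.1 && r4.1
        (res, r4.2.insert (a, b, k) res)

def f_alt (s1 : Int) (s2 : Int) (c : Int) (m : Int) : Bool :=
  (gB m ((m - c).toNat + (141 - s1 - s2).toNat + 1) s1 s2 c PySem.Dict.empty).1

-- ===== PRECONDITION & SPEC =====
-- Pre_f excludes exactly the inputs on which A raises RecursionError instead of returning:
-- with c > m and a heap ≤ 0 (and no immediate win) the move that doubles that heap never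
-- increases the heap sum, so that path of A's eagerly-built move list recurses forever; with
-- c ≤ m, a heap ≤ 0 and m - c > 600 the recursion depth m - c exceeds Python's limit
-- (with both heaps ≥ 1 the heap sum grows every move, so the depth is bounded by 141).
def Pre_f (s1 : Int) (s2 : Int) (c : Int) (m : Int) : Prop :=
  s1 + s2 ≥ 141 ∨ (c ≤ m ∧ (m - c ≤ 600 ∨ (1 ≤ s1 ∧ 1 ≤ s2))) ∨ (m < c ∧ 1 ≤ s1 ∧ 1 ≤ s2)
instance (s1 : Int) (s2 : Int) (c : Int) (m : Int) : Decidable (Pre_f s1 s2 c m) := by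
  unfold Pre_f; infer_instance

def pvWitness_f : Int × Int × Int × Int := (0, 0, 0, 3)

def Spec_f (s1 : Int) (s2 : Int) (c : Int) (m : Int) (out : Bool) : Prop := out = f_alt s1 s2 c m
instance (s1 : Int) (s2 : Int) (c : Int) (m : Int) (out : Bool) : Decidable (Spec_f s1 s2 c m out) := by unfold Spec_f; infer_instance

-- ===== CLAIM (what is proved, stated in full; the proofs are below) =====
def Claim_equal_f : Prop := ∀ (s1 : Int) (s2 : Int) (c : Int) (m : Int), Dom_f s1 s2 c m → Pre_f s1 s2 c m → Spec_f s1 s2 c m (f s1 s2 c m)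

-- ===== LEMMAS AND PROOFS =====

-- A fuel is sufficient for a state: with c ≤ m the depth to the c = m cutoff is m - c; with
-- m < c and both heaps ≥ 1 the heap sum grows every move, so the depth to sum ≥ 141 is bounded.
def Suff (m : Int) (a : Int) (b : Int) (k : Int) (fuel : Nat) : Prop :=
  (k ≤ m ∧ (m - k).toNat < fuel) ∨ (m < k ∧ 1 ≤ a ∧ 1 ≤ b ∧ (141 - a - b).toNat < fuel)

theorem suff_pos {m a b k : Int} {fuel : Nat} (h : Suff m a b k fuel) : 0 < fuel := by
  unfold Suff at h; omega

theorem suff_child {m a b k : Int} {fuel : Nat} (h : Suff m a b k (fuel + 1))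
    (hs : ¬ a + b ≥ 141) (hk : k ≠ m) (a' b' : Int)
    (hab : (a' = a + 1 ∧ b' = b) ∨ (a' = a * 2 ∧ b' = b) ∨
           (a' = a ∧ b' = b + 1) ∨ (a' = a ∧ b' = b * 2)) :
    Suff m a' b' (k + 1) fuel := by
  unfold Suff at h ⊢; rcases hab with ⟨h1, h2⟩ | ⟨h1, h2⟩ | ⟨h1, h2⟩ | ⟨h1, h2⟩ <;> omega

-- The value fA computes does not depend on the fuel, as long as the fuel is sufficient.
theorem fA_stable (m : Int) :
    ∀ (f1 f2 : Nat) (a b k : Int), Suff m a b k f1 → Suff m a b k f2 →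
      fA f1 a b k m = fA f2 a b k m := by
  intro f1
  induction f1 with
  | zero => intro f2 a b k h1 _; exact absurd (suff_pos h1) (by omega)
  | succ f1 ih =>
    intro f2 a b k h1 h2
    obtain ⟨f2', rfl⟩ : ∃ f2', f2 = f2' + 1 := ⟨f2 - 1, by have := suff_pos h2; omega⟩
    by_cases hs : a + b ≥ 141
    · simp [fA, hs]
    · by_cases hk : k = m
      · simp [fA, hs, hk]
      · have e1 := ih f2' (a + 1) b (k + 1)
          (suff_child h1 hs hk _ _ (Or.inl ⟨rfl, rfl⟩))
          (suff_child h2 hs hk _ _ (Or.inl ⟨rfl, rfl⟩))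
        have e2 := ih f2' (a * 2) b (k + 1)
          (suff_child h1 hs hk _ _ (Or.inr (Or.inl ⟨rfl, rfl⟩)))
          (suff_child h2 hs hk _ _ (Or.inr (Or.inl ⟨rfl, rfl⟩)))
        have e3 := ih f2' a (b + 1) (k + 1)
          (suff_child h1 hs hk _ _ (Or.inr (Or.inr (Or.inl ⟨rfl, rfl⟩))))
          (suff_child h2 hs hk _ _ (Or.inr (Or.inr (Or.inl ⟨rfl, rfl⟩))))
        have e4 := ih f2' a (b * 2) (k + 1)
          (suff_child h1 hs hk _ _ (Or.inr (Or.inr (Or.inr ⟨rfl, rfl⟩))))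
          (suff_child h2 hs hk _ _ (Or.inr (Or.inr (Or.inr ⟨rfl, rfl⟩))))
        simp only [fA, if_neg hs, if_neg hk]
        rw [e1, e2, e3, e4]

-- Every memo entry stores the (fuel-independent) value of A's recursion at its key.
def GoodMemo (m : Int) (memo : PySem.Dict (Int × Int × Int) Bool) : Prop :=
  ∀ (a b k : Int) (v : Bool), memo.get? (a, b, k) = some v →
    ∀ fuel, Suff m a b k fuel → fA fuel a b k m = v

theorem goodMemo_empty (m : Int) : GoodMemo m PySem.Dict.empty := by
  intro a b k v h
  simp [PySem.Dict.empty, PySem.Dict.get?] at h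

theorem gB_correct (m : Int) :
    ∀ (fuel : Nat) (a b k : Int) (memo : PySem.Dict (Int × Int × Int) Bool),
      Suff m a b k fuel → GoodMemo m memo →
      (gB m fuel a b k memo).1 = fA fuel a b k m ∧ GoodMemo m (gB m fuel a b k memo).2 := by
  intro fuel
  induction fuel with
  | zero => intro a b k memo h _; exact absurd (suff_pos h) (by omega)
  | succ fuel ih =>
    intro a b k memo hsuff hm
    by_cases hs : a + b ≥ 141
    · constructor
      · simp [gB, fA, hs]
      · simp only [gB, if_pos hs]; exact hm
    · by_cases hk : k = m
      · constructor
        · simp [gB, fA, hs, hk]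
        · simp only [gB, if_neg hs, if_pos hk]; exact hm
      · rcases hget : memo.get? (a, b, k) with _ | v
        · -- cache miss: the four recursive calls thread the memo; the result is inserted
          obtain ⟨e1, g1⟩ := ih (a + 1) b (k + 1) memo
            (suff_child hsuff hs hk _ _ (Or.inl ⟨rfl, rfl⟩)) hm
          obtain ⟨e2, g2⟩ := ih (a * 2) b (k + 1) _
            (suff_child hsuff hs hk _ _ (Or.inr (Or.inl ⟨rfl, rfl⟩))) g1
          obtain ⟨e3, g3⟩ := ih a (b + 1) (k + 1) _
            (suff_child hsuff hs hk _ _ (Or.inr (Or.inr (Or.inl ⟨rfl, rfl⟩)))) g2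
          obtain ⟨e4, g4⟩ := ih a (b * 2) (k + 1) _
            (suff_child hsuff hs hk _ _ (Or.inr (Or.inr (Or.inr ⟨rfl, rfl⟩)))) g3
          have hres : (gB m (fuel + 1) a b k memo).1 = fA (fuel + 1) a b k m := by
            simp only [gB, if_neg hs, if_neg hk, hget]
            simp only [fA, if_neg hs, if_neg hk]
            rw [e1, e2, e3, e4]
          refine ⟨hres, ?_⟩
          have hmem2 : (gB m (fuel + 1) a b k memo).2 =
              (gB m fuel a (b * 2) (k + 1) (gB m fuel a (b + 1) (k + 1)
                (gB m fuel (a * 2) b (k + 1) (gB m fuel (a + 1) b (k + 1) memo).2).2).2).2.insert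
                (a, b, k) (gB m (fuel + 1) a b k memo).1 := by
            simp only [gB, if_neg hs, if_neg hk, hget]
          rw [hmem2, hres]
          intro a' b' k' v' hv' fuel' hsuff'
          rw [PySem.Dict.get?_insert] at hv'
          by_cases hkey : ((a', b', k') : Int × Int × Int) = (a, b, k)
          · rw [if_pos hkey] at hv'
            have ha : a' = a := congrArg (fun p => p.1) hkey
            have hb : b' = b := congrArg (fun p => p.2.1) hkey
            have hc : k' = k := congrArg (fun p => p.2.2) hkey
            cases hv'
            subst ha; subst hb; subst hc
            exact fA_stable m fuel' (fuel + 1) a' b' k' hsuff' hsuff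
          · rw [if_neg hkey] at hv'
            exact g4 a' b' k' v' hv' fuel' hsuff'
        · -- cache hit
          constructor
          · simp only [gB, if_neg hs, if_neg hk, hget]
            exact (hm a b k v hget (fuel + 1) hsuff).symm
          · simp only [gB, if_neg hs, if_neg hk, hget]
            exact hm

-- ===== VERDICT (by name: the statement is the Claim_ definition above) =====
theorem f_spec : Claim_equal_f := by
  intro s1 s2 c m _ hpre
  unfold Spec_f f f_alt
  by_cases hs : s1 + s2 ≥ 141
  · simp [fA, gB, hs]
  · have hsuff : Suff m s1 s2 c ((m - c).toNat + (141 - s1 - s2).toNat + 1) := by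
      unfold Pre_f at hpre
      unfold Suff
      rcases hpre with h | ⟨h, _⟩ | ⟨h1, h2, h3⟩
      · exact absurd h hs
      · left; omega
      · right; exact ⟨h1, h2, h3, by omega⟩
    exact ((gB_correct m _ s1 s2 c PySem.Dict.empty hsuff (goodMemo_empty m)).1).symm
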